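-- pv_equiv track=rewrite | github.com/igashov/DiffLinker | data/zinc/prepare_dataset.py | find_non_intersecting_matches
-- ===== SOURCE A (Python) =====
-- import itertools
--
-- def find_non_intersecting_matches(matches1, matches2, matches3):
--     """
--     Checks all possible triplets and selects only non-intersecting matches
--     """
--     triplets = list(itertools.product(matches1, matches2, matches3))
--     non_intersecting_matches = set()
--     for m1, m2, m3 in triplets:
--         m1m2 = set(m1) & set(m2)
--         m1m3 = set(m1) & set(m3)
--         m2m3 = set(m2) & set(m3)
--         if len(m1m2 | m1m3 | m2m3) == 0:
--             non_intersecting_matches.add((m1, m2, m3))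
--     return list(non_intersecting_matches)
-- ===== SOURCE B (Python) =====
-- def find_non_intersecting_matches(matches1, matches2, matches3):
--     """
--     Two-stage search: first keep compatible (m1, m2) pairs with their cached
--     union set, then extend each surviving pair with every disjoint m3.
--     """
--     sets1 = [(m, set(m)) for m in matches1]
--     sets2 = [(m, set(m)) for m in matches2]
--     sets3 = [(m, set(m)) for m in matches3]
--     pairs = [(m1, m2, s1 | s2)
--              for m1, s1 in sets1
--              for m2, s2 in sets2
--              if s1.isdisjoint(s2)]
--     result = set()
--     for m1, m2, u in pairs:
--         for m3, s3 in sets3: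
--             if s3.isdisjoint(u):
--                 result.add((m1, m2, m3))
--     return list(result)
-- ===== Notes on version B (the rewrite author's own statement) =====
-- stated objective: faster
-- what changed: Replaces the single pass over the full materialized matches1 x matches2 x matches3 product (rebuilding all three element-sets and three intersections per triplet) with a staged search: element-sets are precomputed once per match, a pair table of compatible (m1, m2) pairs with cached unions is built first, and only surviving pairs are extended by m3 via one isdisjoint test.
import Mathlib
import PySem

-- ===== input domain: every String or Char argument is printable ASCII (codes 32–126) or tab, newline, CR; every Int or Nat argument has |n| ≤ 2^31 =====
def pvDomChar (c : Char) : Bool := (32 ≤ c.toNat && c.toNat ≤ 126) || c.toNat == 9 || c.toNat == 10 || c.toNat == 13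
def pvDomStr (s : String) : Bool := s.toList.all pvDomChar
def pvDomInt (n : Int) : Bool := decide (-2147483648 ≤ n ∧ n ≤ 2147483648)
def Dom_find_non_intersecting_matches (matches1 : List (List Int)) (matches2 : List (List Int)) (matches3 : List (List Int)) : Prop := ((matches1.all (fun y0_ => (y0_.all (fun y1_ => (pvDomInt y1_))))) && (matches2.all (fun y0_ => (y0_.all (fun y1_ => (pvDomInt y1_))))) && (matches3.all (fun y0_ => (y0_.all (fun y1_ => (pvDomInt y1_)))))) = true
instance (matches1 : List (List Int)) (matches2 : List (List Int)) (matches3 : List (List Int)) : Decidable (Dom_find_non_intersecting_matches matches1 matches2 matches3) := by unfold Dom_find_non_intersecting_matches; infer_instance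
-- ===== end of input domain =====

-- B stages the search (per-match element-sets computed once, a table of compatible (m1, m2)
-- pairs with cached unions built first, then each surviving pair extended by every disjoint m3)
-- instead of A's scan of the full materialized triple product; both result sets are modelled
-- in first-insertion order, and outputs are compared as sets.

-- ===== PORT A =====
def find_non_intersecting_matches (matches1 : List (List Int)) (matches2 : List (List Int)) (matches3 : List (List Int)) : List (List Int × List Int × List Int) :=
  -- triplets = list(itertools.product(matches1, matches2, matches3))
  let triplets := matches1.flatMap (fun m1 => matches2.flatMap (fun m2 => matches3.map (fun m3 => (m1, m2, m3))))
  -- for m1, m2, m3 in triplets: m1m2 = set(m1) & set(m2); …; if len(m1m2 | m1m3 | m2m3) == 0: non_intersecting_matches.add((m1, m2, m3))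
  let non_intersecting : PySem.Set (List Int × List Int × List Int) :=
    triplets.foldl (fun acc t =>
      let m1m2 := PySem.Set.inter (PySem.Set.ofList t.1) (PySem.Set.ofList t.2.1)
      let m1m3 := PySem.Set.inter (PySem.Set.ofList t.1) (PySem.Set.ofList t.2.2)
      let m2m3 := PySem.Set.inter (PySem.Set.ofList t.2.1) (PySem.Set.ofList t.2.2)
      if PySem.Set.len (PySem.Set.union (PySem.Set.union m1m2 m1m3) m2m3) == 0 then
        PySem.Set.add acc t
      else acc) PySem.Set.empty
  -- return list(non_intersecting_matches): the set in first-insertion order (hash order is not modelled; outputs are compared as sets)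
  non_intersecting

-- ===== PORT B =====
def find_non_intersecting_matches_alt (matches1 : List (List Int)) (matches2 : List (List Int)) (matches3 : List (List Int)) : List (List Int × List Int × List Int) :=
  let sets1 := matches1.map (fun m => (m, PySem.Set.ofList m))
  let sets2 := matches2.map (fun m => (m, PySem.Set.ofList m))
  let sets3 := matches3.map (fun m => (m, PySem.Set.ofList m))
  -- pairs = [(m1, m2, s1 | s2) for m1, s1 in sets1 for m2, s2 in sets2 if s1.isdisjoint(s2)]
  let pairs := sets1.flatMap (fun p1 => sets2.filterMap (fun p2 =>
      if PySem.Set.isdisjoint p1.2 p2.2 then some (p1.1, p2.1, PySem.Set.union p1.2 p2.2) else none))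
  -- for m1, m2, u in pairs: for m3, s3 in sets3: if s3.isdisjoint(u): result.add((m1, m2, m3))
  let result : PySem.Set (List Int × List Int × List Int) :=
    pairs.foldl (fun acc pr =>
      sets3.foldl (fun acc p3 =>
        if PySem.Set.isdisjoint p3.2 pr.2.2 then PySem.Set.add acc (pr.1, pr.2.1, p3.1) else acc) acc)
      PySem.Set.empty
  -- return list(result): the set in first-insertion order (outputs are compared as sets)
  result

-- ===== PRECONDITION & SPEC =====
def Spec_find_non_intersecting_matches (matches1 : List (List Int)) (matches2 : List (List Int)) (matches3 : List (List Int)) (out : List (List Int × List Int × List Int)) : Prop := out = find_non_intersecting_matches_alt matches1 matches2 matches3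
instance (matches1 : List (List Int)) (matches2 : List (List Int)) (matches3 : List (List Int)) (out : List (List Int × List Int × List Int)) : Decidable (Spec_find_non_intersecting_matches matches1 matches2 matches3 out) := by unfold Spec_find_non_intersecting_matches; infer_instance

-- ===== CLAIM (what is proved, stated in full; the proofs are below) =====
def Claim_equal_find_non_intersecting_matches : Prop := ∀ (matches1 : List (List Int)) (matches2 : List (List Int)) (matches3 : List (List Int)), Dom_find_non_intersecting_matches matches1 matches2 matches3 → Spec_find_non_intersecting_matches matches1 matches2 matches3 (find_non_intersecting_matches matches1 matches2 matches3)

-- ===== LEMMAS AND PROOFS =====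

-- A's test "the union of the three pairwise intersections is empty" equals B's staged pair of
-- disjointness tests "s1 disjoint s2, and s3 disjoint (s1 | s2)".
lemma pv_cond_eq (m1 m2 m3 : List Int) :
    (PySem.Set.len (PySem.Set.union (PySem.Set.union
        (PySem.Set.inter (PySem.Set.ofList m1) (PySem.Set.ofList m2))
        (PySem.Set.inter (PySem.Set.ofList m1) (PySem.Set.ofList m3)))
        (PySem.Set.inter (PySem.Set.ofList m2) (PySem.Set.ofList m3))) == 0)
    = (PySem.Set.isdisjoint (PySem.Set.ofList m1) (PySem.Set.ofList m2) &&
       PySem.Set.isdisjoint (PySem.Set.ofList m3)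
         (PySem.Set.union (PySem.Set.ofList m1) (PySem.Set.ofList m2))) := by
  rw [Bool.eq_iff_iff]
  simp only [beq_iff_eq, Bool.and_eq_true, PySem.Set.isdisjoint_iff, PySem.Set.mem_union,
    PySem.Set.mem_inter, PySem.Set.mem_ofList, PySem.Set.len, Int.natCast_eq_zero,
    List.length_eq_zero_iff, List.eq_nil_iff_forall_not_mem]
  constructor
  · intro h; exact ⟨fun x a b => h x (Or.inl (Or.inl ⟨a, b⟩)),
      fun x c d => d.elim (fun a => h x (Or.inl (Or.inr ⟨a, c⟩))) (fun b => h x (Or.inr ⟨b, c⟩))⟩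
  · rintro ⟨h12, h3⟩ x ((⟨a, b⟩ | ⟨a, c⟩) | ⟨b, c⟩)
    · exact h12 x a b
    · exact h3 x c (Or.inl a)
    · exact h3 x c (Or.inr b)

lemma pv_foldl_id {α β : Type} (l : List α) (b : β) : l.foldl (fun a _ => a) b = b := by
  induction l generalizing b <;> simp_all [List.foldl]

lemma pv_foldl_ext {α β : Type} (f g : β → α → β) (l : List α)
    (h : ∀ acc x, f acc x = g acc x) (init : β) : l.foldl f init = l.foldl g init := by
  induction l generalizing init <;> simp_all [List.foldl]

lemma pv_foldl_flatMap {α β γ : Type} (l : List α) (g : α → List β) (f : γ → β → γ) (init : γ) :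
    (l.flatMap g).foldl f init = l.foldl (fun acc x => (g x).foldl f acc) init := by
  induction l generalizing init <;> simp_all [List.foldl, List.foldl_append]

lemma pv_foldl_filterMap {α β γ : Type} (l : List α) (g : α → Option β) (f : γ → β → γ) (init : γ) :
    (l.filterMap g).foldl f init
      = l.foldl (fun acc x => match g x with | some y => f acc y | none => acc) init := by
  induction l generalizing init with
  | nil => rfl
  | cons a t ih => cases hga : g a <;> simp_all [List.filterMap_cons, List.foldl]

-- Both ports insert exactly the compatible triplets, in the same lexicographic order.
theorem find_non_intersecting_matches_spec_aux (ms1 ms2 ms3 : List (List Int)) :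
    find_non_intersecting_matches ms1 ms2 ms3 = find_non_intersecting_matches_alt ms1 ms2 ms3 := by
  unfold find_non_intersecting_matches find_non_intersecting_matches_alt
  simp only [pv_foldl_flatMap, pv_foldl_filterMap, List.foldl_map]
  apply pv_foldl_ext; intro acc m1
  apply pv_foldl_ext; intro acc2 m2
  by_cases h12 : PySem.Set.isdisjoint (PySem.Set.ofList m1) (PySem.Set.ofList m2) = true
  · simp only [pv_cond_eq, h12, Bool.true_and, if_true]
  · simp only [pv_cond_eq, Bool.not_eq_true] at h12 ⊢
    simp only [h12, Bool.false_and, if_false, Bool.false_eq_true]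
    exact pv_foldl_id ms3 acc2

-- ===== VERDICT (by name: the statement is the Claim_ definition above) =====
theorem find_non_intersecting_matches_spec : Claim_equal_find_non_intersecting_matches := by
  intro matches1 matches2 matches3 _
  exact find_non_intersecting_matches_spec_aux matches1 matches2 matches3
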